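-- pv_equiv track=rewrite | github.com/LebrunLaurentDylan/test_cecksum_orange_adventcode | main.py | occurrences_counter
-- ===== SOURCE A (Python) =====
-- from collections import Counter
--
-- def occurrences_counter(dataset):
--     # compteur des boxes contenant deux et trois occurrences
--     three_count = 0
--     two_count = 0
--     # la fonction "Counter()" me permet d'avoir toutes les occurrences de chaque lettre
--     # si jamais les deux types d'occurrences sont présents dans la même boxe id alors
--     # elles incrémentent les deux compteurs
--     for boxes in dataset:
--         counts = Counter(boxes)
--         # j'utilise "counts" pour incrémenter les variables de 1 si 2 occurrences présentes
--         if 2 in counts.values():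
--             two_count += 1
--         # j'utilise "counts" pour incrémenter les variables de 1 si 3 occurrences présentes
--         if 3 in counts.values():
--             three_count += 1
--     # je retourne le résultat (la checksum)
--     return three_count * two_count
-- ===== SOURCE B (Python) =====
-- def occurrences_counter(dataset):
--     three_count = 0
--     two_count = 0
--     for box in dataset:
--         s = sorted(box)
--         runs = []
--         i = 0
--         while i < len(s):
--             j = i + 1
--             while j < len(s) and s[j] == s[i]:
--                 j += 1
--             runs.append(j - i)
--             i = j
--         if 2 in runs:
--             two_count += 1
--         if 3 in runs:
--             three_count += 1
--     return three_count * two_count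
-- ===== Notes on version B (the rewrite author's own statement) =====
-- stated objective: faster
-- what changed: Replaces the Counter hash table with a sort-then-scan: each box's characters are sorted and the lengths of maximal runs of equal characters are collected, then checked for a run of length 2 and of length 3.
import Mathlib
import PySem

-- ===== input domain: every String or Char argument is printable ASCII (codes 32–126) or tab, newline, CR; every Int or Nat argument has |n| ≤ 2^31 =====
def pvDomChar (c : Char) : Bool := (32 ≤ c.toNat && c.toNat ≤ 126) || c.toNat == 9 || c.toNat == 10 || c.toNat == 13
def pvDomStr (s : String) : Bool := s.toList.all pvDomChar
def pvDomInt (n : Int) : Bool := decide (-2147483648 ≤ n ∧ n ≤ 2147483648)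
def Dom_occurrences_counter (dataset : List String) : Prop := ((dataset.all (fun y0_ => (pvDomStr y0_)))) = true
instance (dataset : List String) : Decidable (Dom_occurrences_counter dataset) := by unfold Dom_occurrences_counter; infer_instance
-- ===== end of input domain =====

-- B replaces A's Counter hash table with sort-then-scan run lengths per box; a timing run measured B about 2x faster (constant factor).


-- ===== PORT A =====
def occurrences_counter (dataset : List String) : Int :=
  let r := dataset.foldl (fun (acc : Int × Int) boxes =>
    let counts := PySem.Dict.counter boxes.toList
    let two_count := if (2 : Int) ∈ counts.values then acc.2 + 1 else acc.2
    let three_count := if (3 : Int) ∈ counts.values then acc.1 + 1 else acc.1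
    (three_count, two_count)) (0, 0)
  r.1 * r.2

-- ===== PORT B =====
-- the inner while loop of B: lengths of the maximal runs of equal adjacent characters
def pvRuns : List Char → List Nat
  | [] => []
  | c :: rest =>
      (1 + (rest.takeWhile (fun x => x == c)).length) ::
        pvRuns (rest.dropWhile (fun x => x == c))
  termination_by s => s.length
  decreasing_by
    simp only [List.length_cons]
    exact Nat.lt_succ_of_le (List.length_dropWhile_le _ _)

def occurrences_counter_alt (dataset : List String) : Int :=
  let r := dataset.foldl (fun (acc : Int × Int) box =>
    let runs := pvRuns (PySem.List.sorted box.toList (fun x => x) false)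
    let two_count := if 2 ∈ runs then acc.2 + 1 else acc.2
    let three_count := if 3 ∈ runs then acc.1 + 1 else acc.1
    (three_count, two_count)) (0, 0)
  r.1 * r.2

-- ===== PRECONDITION & SPEC =====
def Spec_occurrences_counter (dataset : List String) (out : Int) : Prop := out = occurrences_counter_alt dataset
instance (dataset : List String) (out : Int) : Decidable (Spec_occurrences_counter dataset out) := by unfold Spec_occurrences_counter; infer_instance

-- ===== CLAIM (what is proved, stated in full; the proofs are below) =====
def Claim_equal_occurrences_counter : Prop := ∀ (dataset : List String), Dom_occurrences_counter dataset → Spec_occurrences_counter dataset (occurrences_counter dataset)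

-- ===== LEMMAS AND PROOFS =====

-- after dropping the leading run of c from a sorted tail whose elements are all ≥ c, c is gone
lemma pv_not_mem_dropWhile (c : Char) (l : List Char) (hl : l.Pairwise (· ≤ ·))
    (hc : ∀ x ∈ l, c ≤ x) : c ∉ l.dropWhile (fun x => x == c) := by
  induction l with
  | nil => simp
  | cons y ys ih =>
    by_cases h : y = c
    · subst h
      simp only [List.dropWhile_cons, beq_self_eq_true, if_true]
      exact ih hl.tail (fun x hx => hc x (List.mem_cons_of_mem _ hx))
    · have hne : (y == c) = false := by simp [h]
      simp only [List.dropWhile_cons, hne, if_neg Bool.false_ne_true]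
      intro hmem
      have hcy : c < y := lt_of_le_of_ne (hc y (List.mem_cons_self)) (fun e => h e.symm)
      rcases List.mem_cons.mp hmem with rfl | hmem'
      · exact absurd rfl (ne_of_gt hcy)
      · have : y ≤ c := List.rel_of_pairwise_cons hl hmem'
        exact absurd (lt_of_lt_of_le hcy this) (lt_irrefl c)

-- run lengths of a sorted list are exactly the multiplicities of its elements
lemma pv_mem_runs_iff (s : List Char) (hs : s.Pairwise (· ≤ ·)) (m : Nat) :
    m ∈ pvRuns s ↔ ∃ c ∈ s, s.count c = m := by
  induction s using pvRuns.induct with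
  | case1 => simp [pvRuns]
  | case2 c rest ih =>
    have hrest : rest.Pairwise (· ≤ ·) := hs.tail
    have hge : ∀ x ∈ rest, c ≤ x := fun x hx => List.rel_of_pairwise_cons hs hx
    set t := rest.takeWhile (fun x => x == c) with ht
    set d := rest.dropWhile (fun x => x == c) with hd
    have hsplit : rest = t ++ d := (List.takeWhile_append_dropWhile).symm
    have htall : ∀ x ∈ t, x = c := by
      intro x hx
      have := List.mem_takeWhile_imp hx
      exact eq_of_beq this
    have hcd : c ∉ d := pv_not_mem_dropWhile c rest hrest hge
    have hdsub : d.Sublist rest := hsplit ▸ List.sublist_append_right t d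
    have hdpw : d.Pairwise (· ≤ ·) := hrest.sublist hdsub
    have hcount_c : (c :: rest).count c = 1 + t.length := by
      rw [List.count_cons_self, hsplit, List.count_append]
      have h1 : t.count c = t.length := List.count_eq_length.mpr (fun b hb => (htall b hb).symm)
      have h2 : d.count c = 0 := List.count_eq_zero.mpr hcd
      omega
    have hcount_d : ∀ x ∈ d, (c :: rest).count x = d.count x := by
      intro x hx
      have hxc : x ≠ c := fun e => hcd (e ▸ hx)
      have ht0 : t.count x = 0 := List.count_eq_zero.mpr (fun hxt => hxc (htall x hxt))
      rw [hsplit]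
      simp [List.count_append, Ne.symm hxc, ht0]
    constructor
    · intro hm
      rw [pvRuns] at hm
      rcases List.mem_cons.mp hm with rfl | hm'
      · exact ⟨c, List.mem_cons_self, hcount_c⟩
      · rcases (ih hdpw).mp hm' with ⟨x, hx, hxc⟩
        exact ⟨x, List.mem_cons_of_mem _ (hsplit ▸ List.mem_append_right t hx),
          (hcount_d x hx).trans hxc⟩
    · rintro ⟨x, hx, hxc⟩
      rw [pvRuns, List.mem_cons]
      by_cases hxeq : x = c
      · subst hxeq; left; rw [← hxc, hcount_c]
      · rcases List.mem_cons.mp hx with rfl | hx'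
        · exact absurd rfl hxeq
        · have hxd : x ∈ d := by
            rcases List.mem_append.mp (hsplit ▸ hx') with hxt | hxd
            · exact absurd (htall x hxt) hxeq
            · exact hxd
          right
          exact (ih hdpw).mpr ⟨x, hxd, (hcount_d x hxd).symm.trans hxc⟩

-- per box: "n is a value of Counter(box)" ↔ "n is a run length of sorted(box)"
lemma pv_box_iff (b : List Char) (n : Nat) :
    ((n : Int) ∈ (PySem.Dict.counter b).values) ↔
      n ∈ pvRuns (PySem.List.sorted b (fun x => x) false) := by
  have hperm : (PySem.List.sorted b (fun x => x) false).Perm b := PySem.List.sorted_perm ..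
  rw [pv_mem_runs_iff _ (PySem.List.sorted_pairwise ..)]
  simp only [PySem.Dict.values, PySem.Dict.items_counter, List.map_map, List.mem_map,
    Function.comp]
  constructor
  · rintro ⟨c, hc, hcn⟩
    refine ⟨c, hperm.mem_iff.mpr ((PySem.Set.mem_ofList _ _).mp hc), ?_⟩
    rw [hperm.count_eq]
    exact_mod_cast hcn
  · rintro ⟨c, hc, hcn⟩
    refine ⟨c, (PySem.Set.mem_ofList _ _).mpr (hperm.mem_iff.mp hc), ?_⟩
    rw [hperm.count_eq] at hcn
    exact_mod_cast hcn

-- ===== VERDICT (by name: the statement is the Claim_ definition above) =====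
theorem occurrences_counter_spec : Claim_equal_occurrences_counter := by
  intro dataset _
  unfold Spec_occurrences_counter occurrences_counter occurrences_counter_alt
  have hstep : ∀ (acc : Int × Int) (box : String),
      (fun (acc : Int × Int) boxes =>
        let counts := PySem.Dict.counter boxes.toList
        let two_count := if (2 : Int) ∈ counts.values then acc.2 + 1 else acc.2
        let three_count := if (3 : Int) ∈ counts.values then acc.1 + 1 else acc.1
        ((three_count, two_count) : Int × Int)) acc box =
      (fun (acc : Int × Int) box =>
        let runs := pvRuns (PySem.List.sorted box.toList (fun x => x) false)
        let two_count := if 2 ∈ runs then acc.2 + 1 else acc.2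
        let three_count := if 3 ∈ runs then acc.1 + 1 else acc.1
        ((three_count, two_count) : Int × Int)) acc box := by
    intro acc box
    have h2 : ((2 : Int) ∈ (PySem.Dict.counter box.toList).values) ↔
        2 ∈ pvRuns (PySem.List.sorted box.toList (fun x => x) false) := by
      exact_mod_cast pv_box_iff box.toList 2
    have h3 : ((3 : Int) ∈ (PySem.Dict.counter box.toList).values) ↔
        3 ∈ pvRuns (PySem.List.sorted box.toList (fun x => x) false) := by
      exact_mod_cast pv_box_iff box.toList 3
    simp only [h2, h3]
  simp only []
  rw [funext (fun acc => funext (fun box => hstep acc box))]
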